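-- pv_equiv track=rewrite | github.com/Cloutiere/CodeToText | analysis_profiles.py | generate_consolidated_files
-- ===== SOURCE A (Python) =====
-- from collections.abc import Iterable
--
-- def generate_consolidated_files(
--     categorized_files: list[tuple[str, set[str]]]
-- ) -> dict[str, str]:
--     def join_blocks(blocks: Iterable[str]) -> str:
--         return "\n\n".join(blocks)
--
--     backend_core_parts = [b for b, c in categorized_files if "BACKEND_CORE" in c]
--     backend_config_parts = [b for b, c in categorized_files if "BACKEND_CONFIG" in c]
--     backend_code_critical_parts = [b for b, c in categorized_files if "BACKEND_CODE_CRITICAL" in c]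
--     backend_services_critical_parts = [b for b, c in categorized_files if "BACKEND_SERVICES_CRITICAL" in c]
--
--     # Correction de la ligne tronquée (Ligne 731 dans la version précédente)
--     backend_code_parts = [
--         b for b, c in categorized_files
--         if "BACKEND_CODE" in c and not (
--             "BACKEND_CORE" in c or "BACKEND_CONFIG" in c or "BACKEND_MIGRATIONS" in c or
--             "BACKEND_CODE_CRITICAL" in c or "BACKEND_SERVICES_CRITICAL" in c
--         )
--     ]
--
--     frontend_code_parts = [b for b, c in categorized_files if "FRONTEND_CODE" in c]
--     frontend_static_parts = [b for b, c in categorized_files if "FRONTEND_STATIC" in c]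
--     frontend_config_parts = [b for b, c in categorized_files if "FRONTEND_CONFIG" in c]
--     frontend_types_parts = [b for b, c in categorized_files if "FRONTEND_TYPES" in c]
--
--     config_doc_parts = [b for b, c in categorized_files if "CONFIG_DOC" in c]
--     tests_parts = [b for b, c in categorized_files if "TESTS" in c]
--     other_parts = [b for b, c in categorized_files if "OTHER" in c]
--
--     output_files = {}
--
--     # 1. Consolidation SANS TESTS
--     all_parts_no_tests = (
--         config_doc_parts +
--         backend_core_parts +
--         backend_config_parts +
--         backend_code_critical_parts +
--         backend_services_critical_parts +
--         backend_code_parts +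
--         frontend_code_parts +
--         frontend_types_parts +
--         frontend_config_parts +
--         frontend_static_parts +
--         other_parts # Inclure 'OTHER' car il peut contenir des fichiers non classifiés mais importants
--     )
--     output_files["__code_mermaid_complet_sans_tests.txt"] = join_blocks(all_parts_no_tests)
--
--     # 2. Consolidation AVEC TESTS
--     all_parts = all_parts_no_tests + tests_parts
--     output_files["__code_mermaid_complet.txt"] = join_blocks(all_parts)
--
--     # 3. Consolidation thématique spécifique (gardée pour l'analyse granulée)
--
--     # Backend Consolidation: Combine core, config (key files), critical routes/services, and general code
--     output_files["__code_mermaid_backend.txt"] = join_blocks(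
--         backend_core_parts +
--         [b for b in backend_config_parts if "requirements.txt" in b or ".replit" in b] + # Include only key config files here
--         backend_code_critical_parts +
--         backend_services_critical_parts +
--         backend_code_parts
--     )
--
--     # Frontend Consolidation: Combine code, types, config (key files), and static assets
--     output_files["__code_mermaid_frontend.txt"] = join_blocks(
--         frontend_code_parts +
--         frontend_types_parts +
--         [b for b in frontend_config_parts if "package.json" in b or "vite.config.ts" in b or "tailwind.config.js" in b or "tsconfig" in b or "postcss.config.js" in b] + # Key frontend configs
--         frontend_static_parts
--     )
--
--     # Config and Docs: Critical docs, root readme, structure, dda, etc.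
--     # Collect remaining backend configs (e.g. alembic.ini)
--     remaining_backend_configs = [b for b in backend_config_parts if "requirements.txt" not in b and ".replit" not in b]
--     # Collect remaining frontend configs (e.g. non-critical tsconfig components)
--     remaining_frontend_configs = [b for b in frontend_config_parts if "package.json" not in b and "vite.config.ts" not in b and "tailwind.config.js" not in b and "tsconfig" not in b and "postcss.config.js" not in b]
--
--     output_files["__code_mermaid_config_docs.txt"] = join_blocks(
--         config_doc_parts +
--         remaining_backend_configs +
--         remaining_frontend_configs
--     )
--
--     # Include tests and others in dedicated files if they exist (in addition to the comprehensive files)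
--     if tests_parts:
--         output_files["__code_mermaid_tests.txt"] = join_blocks(tests_parts)
--     if other_parts:
--         output_files["__code_mermaid_other.txt"] = join_blocks(other_parts)
--
--     return output_files
-- ===== SOURCE B (Python) =====
-- # Table-driven rewrite: no intermediate category buckets at all.  Each output
-- # file is described declaratively as an ordered list of section PREDICATES over
-- # a (block, categories) entry; one generic renderer interprets a section list by
-- # scanning the input once per section.  The two conditional outputs are guarded
-- # by an 'any entry matches' test on their predicate.
-- def generate_consolidated_files(
--     categorized_files: list[tuple[str, set[str]]]
-- ) -> dict[str, str]:
--     def cat(name):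
--         return lambda b, c: name in c
--
--     def general_backend(b, c):
--         return "BACKEND_CODE" in c and not any(
--             t in c for t in ("BACKEND_CORE", "BACKEND_CONFIG", "BACKEND_MIGRATIONS",
--                              "BACKEND_CODE_CRITICAL", "BACKEND_SERVICES_CRITICAL"))
--
--     BACKEND_KEYS = ("requirements.txt", ".replit")
--     FRONTEND_KEYS = ("package.json", "vite.config.ts", "tailwind.config.js",
--                      "tsconfig", "postcss.config.js")
--
--     def key_cfg(name, keys):
--         return lambda b, c: name in c and any(k in b for k in keys)
--
--     def rest_cfg(name, keys):
--         return lambda b, c: name in c and not any(k in b for k in keys)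
--
--     base = [cat("CONFIG_DOC"), cat("BACKEND_CORE"), cat("BACKEND_CONFIG"),
--             cat("BACKEND_CODE_CRITICAL"), cat("BACKEND_SERVICES_CRITICAL"),
--             general_backend, cat("FRONTEND_CODE"), cat("FRONTEND_TYPES"),
--             cat("FRONTEND_CONFIG"), cat("FRONTEND_STATIC"), cat("OTHER")]
--
--     layout = [
--         ("__code_mermaid_complet_sans_tests.txt", base),
--         ("__code_mermaid_complet.txt", base + [cat("TESTS")]),
--         ("__code_mermaid_backend.txt",
--          [cat("BACKEND_CORE"), key_cfg("BACKEND_CONFIG", BACKEND_KEYS),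
--           cat("BACKEND_CODE_CRITICAL"), cat("BACKEND_SERVICES_CRITICAL"),
--           general_backend]),
--         ("__code_mermaid_frontend.txt",
--          [cat("FRONTEND_CODE"), cat("FRONTEND_TYPES"),
--           key_cfg("FRONTEND_CONFIG", FRONTEND_KEYS), cat("FRONTEND_STATIC")]),
--         ("__code_mermaid_config_docs.txt",
--          [cat("CONFIG_DOC"), rest_cfg("BACKEND_CONFIG", BACKEND_KEYS),
--           rest_cfg("FRONTEND_CONFIG", FRONTEND_KEYS)]),
--     ]
--
--     def render(sections):
--         return "\n\n".join(
--             b for p in sections for b, c in categorized_files if p(b, c))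
--
--     out = {name: render(sections) for name, sections in layout}
--     for name, p in [("__code_mermaid_tests.txt", cat("TESTS")),
--                     ("__code_mermaid_other.txt", cat("OTHER"))]:
--         if any(p(b, c) for b, c in categorized_files):
--             out[name] = render([p])
--     return out
-- ===== Notes on version B (the rewrite author's own statement) =====
-- stated objective: alternative
-- what changed: A materializes twelve named category lists with comprehensions and hand-assembles each output; B keeps no buckets at all and instead describes each output file as a declarative table of ordered section predicates interpreted by one generic renderer, with the two conditional outputs guarded by an any-match test.
import Mathlib
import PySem

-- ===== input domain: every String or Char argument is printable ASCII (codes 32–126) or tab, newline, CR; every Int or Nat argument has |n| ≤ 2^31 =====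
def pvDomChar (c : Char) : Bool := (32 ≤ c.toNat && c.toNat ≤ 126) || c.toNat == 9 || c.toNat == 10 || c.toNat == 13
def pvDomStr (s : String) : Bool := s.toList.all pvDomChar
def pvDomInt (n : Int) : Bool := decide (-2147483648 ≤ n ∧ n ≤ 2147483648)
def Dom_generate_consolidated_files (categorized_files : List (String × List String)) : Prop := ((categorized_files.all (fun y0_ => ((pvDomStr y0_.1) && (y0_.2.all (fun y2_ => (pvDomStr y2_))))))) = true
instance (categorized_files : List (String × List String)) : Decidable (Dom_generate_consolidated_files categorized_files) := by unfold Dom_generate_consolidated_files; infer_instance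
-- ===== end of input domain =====

-- B replaces A's twelve materialized category lists and hand-written assembly by a
-- declarative table of section predicates interpreted by one generic renderer
-- (objective: alternative, table-driven decomposition; same cost).

-- ===== PORT A =====
-- A: one list comprehension (full scan) per category, then assembly of the output dict.
def generate_consolidated_files (categorized_files : List (String × List String)) : List (String × String) :=
  let join_blocks := fun (blocks : List String) => PySem.Str.join "\n\n" blocks
  let backend_core_parts := (categorized_files.filter (fun p => PySem.Set.contains p.2 "BACKEND_CORE")).map (·.1)
  let backend_config_parts := (categorized_files.filter (fun p => PySem.Set.contains p.2 "BACKEND_CONFIG")).map (·.1)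
  let backend_code_critical_parts := (categorized_files.filter (fun p => PySem.Set.contains p.2 "BACKEND_CODE_CRITICAL")).map (·.1)
  let backend_services_critical_parts := (categorized_files.filter (fun p => PySem.Set.contains p.2 "BACKEND_SERVICES_CRITICAL")).map (·.1)
  let backend_code_parts := (categorized_files.filter (fun p =>
      PySem.Set.contains p.2 "BACKEND_CODE" &&
      !(PySem.Set.contains p.2 "BACKEND_CORE" || (PySem.Set.contains p.2 "BACKEND_CONFIG" || (PySem.Set.contains p.2 "BACKEND_MIGRATIONS" || (PySem.Set.contains p.2 "BACKEND_CODE_CRITICAL" || PySem.Set.contains p.2 "BACKEND_SERVICES_CRITICAL")))))).map (·.1)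
  let frontend_code_parts := (categorized_files.filter (fun p => PySem.Set.contains p.2 "FRONTEND_CODE")).map (·.1)
  let frontend_static_parts := (categorized_files.filter (fun p => PySem.Set.contains p.2 "FRONTEND_STATIC")).map (·.1)
  let frontend_config_parts := (categorized_files.filter (fun p => PySem.Set.contains p.2 "FRONTEND_CONFIG")).map (·.1)
  let frontend_types_parts := (categorized_files.filter (fun p => PySem.Set.contains p.2 "FRONTEND_TYPES")).map (·.1)
  let config_doc_parts := (categorized_files.filter (fun p => PySem.Set.contains p.2 "CONFIG_DOC")).map (·.1)
  let tests_parts := (categorized_files.filter (fun p => PySem.Set.contains p.2 "TESTS")).map (·.1)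
  let other_parts := (categorized_files.filter (fun p => PySem.Set.contains p.2 "OTHER")).map (·.1)
  let all_parts_no_tests :=
    config_doc_parts ++ (backend_core_parts ++ (backend_config_parts ++ (backend_code_critical_parts ++
    (backend_services_critical_parts ++ (backend_code_parts ++ (frontend_code_parts ++
    (frontend_types_parts ++ (frontend_config_parts ++ (frontend_static_parts ++ other_parts)))))))))
  let output_files : List (String × String) := [("__code_mermaid_complet_sans_tests.txt", join_blocks all_parts_no_tests)]
  let all_parts := all_parts_no_tests ++ tests_parts
  let output_files := output_files ++ [("__code_mermaid_complet.txt", join_blocks all_parts)]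
  let output_files := output_files ++ [("__code_mermaid_backend.txt", join_blocks
    (backend_core_parts ++ ((backend_config_parts.filter (fun b => PySem.Str.isIn "requirements.txt" b || PySem.Str.isIn ".replit" b)) ++
    (backend_code_critical_parts ++ (backend_services_critical_parts ++ backend_code_parts)))))]
  let output_files := output_files ++ [("__code_mermaid_frontend.txt", join_blocks
    (frontend_code_parts ++ (frontend_types_parts ++
    ((frontend_config_parts.filter (fun b => PySem.Str.isIn "package.json" b || (PySem.Str.isIn "vite.config.ts" b || (PySem.Str.isIn "tailwind.config.js" b || (PySem.Str.isIn "tsconfig" b || PySem.Str.isIn "postcss.config.js" b))))) ++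
    frontend_static_parts))))]
  let remaining_backend_configs := backend_config_parts.filter (fun b => !PySem.Str.isIn "requirements.txt" b && !PySem.Str.isIn ".replit" b)
  let remaining_frontend_configs := frontend_config_parts.filter (fun b => !PySem.Str.isIn "package.json" b && (!PySem.Str.isIn "vite.config.ts" b && (!PySem.Str.isIn "tailwind.config.js" b && (!PySem.Str.isIn "tsconfig" b && !PySem.Str.isIn "postcss.config.js" b))))
  let output_files := output_files ++ [("__code_mermaid_config_docs.txt", join_blocks
    (config_doc_parts ++ (remaining_backend_configs ++ remaining_frontend_configs)))]
  let output_files := if tests_parts.isEmpty then output_files else output_files ++ [("__code_mermaid_tests.txt", join_blocks tests_parts)]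
  let output_files := if other_parts.isEmpty then output_files else output_files ++ [("__code_mermaid_other.txt", join_blocks other_parts)]
  output_files

-- ===== PORT B =====
-- B-side helpers: the section predicates of the table and the generic renderer
-- (render = 'for p in sections: for (b,c) in files: if p(b,c): yield b', joined).
def pvCat (n : String) : (String × List String) → Bool := fun x => PySem.Set.contains x.2 n

def pvGeneralBackend : (String × List String) → Bool := fun x =>
  PySem.Set.contains x.2 "BACKEND_CODE" &&
  !(["BACKEND_CORE", "BACKEND_CONFIG", "BACKEND_MIGRATIONS", "BACKEND_CODE_CRITICAL",
     "BACKEND_SERVICES_CRITICAL"].any (fun t => PySem.Set.contains x.2 t))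

def pvKeyCfg (n : String) (keys : List String) : (String × List String) → Bool := fun x =>
  PySem.Set.contains x.2 n && keys.any (fun k => PySem.Str.isIn k x.1)

def pvRestCfg (n : String) (keys : List String) : (String × List String) → Bool := fun x =>
  PySem.Set.contains x.2 n && !keys.any (fun k => PySem.Str.isIn k x.1)

def pvRender (cf : List (String × List String)) (sections : List ((String × List String) → Bool)) : String :=
  PySem.Str.join "\n\n" (sections.flatMap (fun p => (cf.filter p).map (·.1)))

def generate_consolidated_files_alt (categorized_files : List (String × List String)) : List (String × String) :=
  let backendKeys := ["requirements.txt", ".replit"]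
  let frontendKeys := ["package.json", "vite.config.ts", "tailwind.config.js", "tsconfig", "postcss.config.js"]
  let base := [pvCat "CONFIG_DOC", pvCat "BACKEND_CORE", pvCat "BACKEND_CONFIG",
               pvCat "BACKEND_CODE_CRITICAL", pvCat "BACKEND_SERVICES_CRITICAL",
               pvGeneralBackend, pvCat "FRONTEND_CODE", pvCat "FRONTEND_TYPES",
               pvCat "FRONTEND_CONFIG", pvCat "FRONTEND_STATIC", pvCat "OTHER"]
  let layout : List (String × List ((String × List String) → Bool)) :=
    [("__code_mermaid_complet_sans_tests.txt", base),
     ("__code_mermaid_complet.txt", base ++ [pvCat "TESTS"]),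
     ("__code_mermaid_backend.txt",
      [pvCat "BACKEND_CORE", pvKeyCfg "BACKEND_CONFIG" backendKeys,
       pvCat "BACKEND_CODE_CRITICAL", pvCat "BACKEND_SERVICES_CRITICAL", pvGeneralBackend]),
     ("__code_mermaid_frontend.txt",
      [pvCat "FRONTEND_CODE", pvCat "FRONTEND_TYPES",
       pvKeyCfg "FRONTEND_CONFIG" frontendKeys, pvCat "FRONTEND_STATIC"]),
     ("__code_mermaid_config_docs.txt",
      [pvCat "CONFIG_DOC", pvRestCfg "BACKEND_CONFIG" backendKeys,
       pvRestCfg "FRONTEND_CONFIG" frontendKeys])]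
  let out := layout.map (fun e => (e.1, pvRender categorized_files e.2))
  let conds : List (String × ((String × List String) → Bool)) :=
    [("__code_mermaid_tests.txt", pvCat "TESTS"), ("__code_mermaid_other.txt", pvCat "OTHER")]
  conds.foldl (fun out e =>
    if categorized_files.any e.2 then out ++ [(e.1, pvRender categorized_files [e.2])] else out) out

-- ===== PRECONDITION & SPEC =====
def Spec_generate_consolidated_files (categorized_files : List (String × List String)) (out : List (String × String)) : Prop := out = generate_consolidated_files_alt categorized_files
instance (categorized_files : List (String × List String)) (out : List (String × String)) : Decidable (Spec_generate_consolidated_files categorized_files out) := by unfold Spec_generate_consolidated_files; infer_instance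

-- ===== CLAIM =====
def Claim_equal_generate_consolidated_files : Prop := ∀ (categorized_files : List (String × List String)), Dom_generate_consolidated_files categorized_files → Spec_generate_consolidated_files categorized_files (generate_consolidated_files categorized_files)

-- ===== LEMMAS AND PROOFS =====
theorem pv_filter_map_filter (cf : List (String × List String)) (p : (String × List String) → Bool) (q : String → Bool) :
    ((cf.filter p).map (·.1)).filter q = (cf.filter (fun x => p x && q x.1)).map (·.1) := by
  induction cf with
  | nil => rfl
  | cons h t ih =>
    by_cases hp : p h = true <;> by_cases hq : q h.1 = true <;>
      simp [hp, hq, ih]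

theorem pv_isEmpty_filter (cf : List (String × List String)) (p : (String × List String) → Bool) :
    ((cf.filter p).map (·.1)).isEmpty = !cf.any p := by
  induction cf with
  | nil => rfl
  | cons h t ih =>
    by_cases hp : p h = true <;> simp [hp, ih]

theorem pvCat_def (n : String) : pvCat n = fun x => PySem.Set.contains x.2 n := rfl
theorem pvGeneralBackend_def : pvGeneralBackend = fun x =>
    PySem.Set.contains x.2 "BACKEND_CODE" &&
    !(["BACKEND_CORE", "BACKEND_CONFIG", "BACKEND_MIGRATIONS", "BACKEND_CODE_CRITICAL",
       "BACKEND_SERVICES_CRITICAL"].any (fun t => PySem.Set.contains x.2 t)) := rfl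
theorem pvKeyCfg_def (n : String) (keys : List String) : pvKeyCfg n keys = fun x =>
    PySem.Set.contains x.2 n && keys.any (fun k => PySem.Str.isIn k x.1) := rfl
theorem pvRestCfg_def (n : String) (keys : List String) : pvRestCfg n keys = fun x =>
    PySem.Set.contains x.2 n && !keys.any (fun k => PySem.Str.isIn k x.1) := rfl

-- ===== VERDICT =====
theorem generate_consolidated_files_spec : Claim_equal_generate_consolidated_files := by
  intro cf _
  simp only [Spec_generate_consolidated_files, generate_consolidated_files,
    generate_consolidated_files_alt, pvRender, pvCat_def, pvGeneralBackend_def, pvKeyCfg_def, pvRestCfg_def,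
    pv_filter_map_filter, pv_isEmpty_filter,
    List.flatMap_cons, List.flatMap_nil, List.map_cons, List.map_nil, List.foldl_cons,
    List.foldl_nil, List.any_cons, List.any_nil, Bool.or_false, Bool.not_or,
    List.append_assoc, List.append_nil, List.cons_append, List.nil_append]
  split <;> (try split) <;> (try split) <;> (try split) <;> simp_all <;> (try tauto)
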